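-- pv_equiv track=rewrite | github.com/ICE27182/Python-3D-renderer | fxaa.py | fxaa
-- ===== SOURCE A (Python) =====
-- def fxaa(pixels, threshold = 64) -> list:
--     width = len(pixels[0])
--     height = len(pixels)
--     frame = pixels[0:1] + [[None] * width for _ in range(height - 2)]
--
--     frame.append(pixels[height - 1])
--
--     for y in range(1, height - 1):
--         frame[y][0] = pixels[y][0]
--         frame[y][width - 1] = pixels[y][width - 1]
--         for x in range(1, width - 1):
--             if (
--                 abs(pixels[y - 1][x][1] - pixels[y][x][1]) +
--                 abs(pixels[y + 1][x][1] - pixels[y][x][1]) +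
--                 abs(pixels[y][x - 1][1] - pixels[y][x][1]) +
--                 abs(pixels[y][x + 1][1] - pixels[y][x][1])
--                 ) > threshold * 2:
--                 # frame[y][x] = [255, 0, 0]
--                 frame[y][x] = [(pixels[y-1][x-1][0] + pixels[y-1][x][0] + pixels[y-1][x+1][0] +
--                                pixels[y][x-1][0] + pixels[y][x][0] + pixels[y][x+1][0] +
--                                pixels[y+1][x-1][0] + pixels[y+1][x][0] + pixels[y+1][x+1][0])//9,
--                                (pixels[y-1][x-1][1] + pixels[y-1][x][1] + pixels[y-1][x+1][1] +
--                                pixels[y][x-1][1] + pixels[y][x][1] + pixels[y][x+1][1] +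
--                                pixels[y+1][x-1][1] + pixels[y+1][x][1] + pixels[y+1][x+1][1])//9,
--                                (pixels[y-1][x-1][2] + pixels[y-1][x][2] + pixels[y-1][x+1][2] +
--                                pixels[y][x-1][2] + pixels[y][x][2] + pixels[y][x+1][2] +
--                                pixels[y+1][x-1][2] + pixels[y+1][x][2] + pixels[y+1][x+1][2])//9,]
--             else:
--                 frame[y][x] = pixels[y][x]
--     return frame
-- ===== SOURCE B (Python) =====
-- def fxaa(pixels, threshold=64):
--     h, w = len(pixels), len(pixels[0])
--
--     # Summed-area tables ([r, g, b] per corner) built once when interior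
--     # pixels exist; each 3x3 blur sum then costs 4 lookups instead of 9 reads.
--     if h > 2 and w > 2:
--         sat = [[[0, 0, 0]] * (w + 1)]
--         for row in pixels:
--             prev = sat[-1]
--             cur = [[0, 0, 0]]
--             for x in range(w):
--                 p = row[x]
--                 a, b, c = prev[x + 1], cur[x], prev[x]
--                 cur.append([p[0] + a[0] + b[0] - c[0],
--                             p[1] + a[1] + b[1] - c[1],
--                             p[2] + a[2] + b[2] - c[2]])
--             sat.append(cur)
--
--     def box(y, x, ch):
--         return (sat[y + 2][x + 2][ch] - sat[y - 1][x + 2][ch]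
--                 - sat[y + 2][x - 1][ch] + sat[y - 1][x - 1][ch])
--
--     def out_pixel(y, x):
--         g = pixels[y][x][1]
--         grad = (abs(pixels[y - 1][x][1] - g) + abs(pixels[y + 1][x][1] - g)
--                 + abs(pixels[y][x - 1][1] - g) + abs(pixels[y][x + 1][1] - g))
--         if grad > threshold * 2:
--             return [box(y, x, 0) // 9, box(y, x, 1) // 9, box(y, x, 2) // 9]
--         return pixels[y][x]
--
--     return (pixels[0:1]
--             + [[pixels[y][x] if x in (0, w - 1) else out_pixel(y, x)
--                 for x in range(w)]
--                for y in range(1, h - 1)]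
--             + [pixels[h - 1]])
-- ===== Notes on version B (the rewrite author's own statement) =====
-- stated objective: alternative
-- what changed: B precomputes per-channel integer summed-area tables once and replaces each nine-read 3x3 blur sum by a four-corner table lookup, building the frame by slicing/comprehension instead of index-mutating a preallocated frame of None rows.
import Mathlib
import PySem

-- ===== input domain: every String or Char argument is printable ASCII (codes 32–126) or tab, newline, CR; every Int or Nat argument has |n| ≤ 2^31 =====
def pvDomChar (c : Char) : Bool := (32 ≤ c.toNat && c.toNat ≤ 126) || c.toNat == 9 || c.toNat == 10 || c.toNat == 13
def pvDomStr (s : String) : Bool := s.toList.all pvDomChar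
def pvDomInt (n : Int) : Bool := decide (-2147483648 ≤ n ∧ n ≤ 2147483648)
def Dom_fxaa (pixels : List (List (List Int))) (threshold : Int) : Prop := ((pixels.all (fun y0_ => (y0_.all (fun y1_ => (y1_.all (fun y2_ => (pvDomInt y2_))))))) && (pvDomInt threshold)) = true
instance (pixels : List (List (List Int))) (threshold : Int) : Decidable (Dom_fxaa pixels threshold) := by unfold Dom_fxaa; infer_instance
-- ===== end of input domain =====

-- B replaces A's nine-read 3x3 box sums by three per-channel summed-area tables
-- (4 lookups per blurred pixel) and builds the frame with comprehensions instead
-- of mutating a preallocated frame; return-value equivalence only (A's result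
-- aliases rows/pixels of the input, B's shares them too but builds fresh middle rows).

-- ===== PORT A =====
-- pixels[y][x] / channel read with nonneg in-range indices (A only reads such under Pre_)
def pvPx (pixels : List (List (List Int))) (y x : Nat) : List Int :=
  (pixels.getD y []).getD x []

def pvCh (pixels : List (List (List Int))) (y x c : Nat) : Int :=
  (pvPx pixels y x).getD c 0

-- the nine-term 3x3 sum of A's blur branch, channel c, followed by Python //9
def pvBlur (pixels : List (List (List Int))) (y x c : Nat) : Int :=
  PySem.Int.floordiv
    (pvCh pixels (y-1) (x-1) c + pvCh pixels (y-1) x c + pvCh pixels (y-1) (x+1) c +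
     pvCh pixels y (x-1) c + pvCh pixels y x c + pvCh pixels y (x+1) c +
     pvCh pixels (y+1) (x-1) c + pvCh pixels (y+1) x c + pvCh pixels (y+1) (x+1) c) 9

def fxaa (pixels : List (List (List Int))) (threshold : Int) : List (List (List Int)) :=
  let width := (pixels.getD 0 []).length
  let height := pixels.length
  let frame := pixels.take 1 ++ (List.range (height - 2)).map (fun _ => List.replicate width ([] : List Int))
  let frame := frame ++ [pixels.getD (height - 1) []]
  (List.range' 1 (height - 2)).foldl (fun frame y =>
    frame.set y (
      let row := (frame.getD y []).set 0 (pvPx pixels y 0)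
      let row := row.set (width - 1) (pvPx pixels y (width - 1))
      (List.range' 1 (width - 2)).foldl (fun row x =>
        row.set x (
          if |pvCh pixels (y-1) x 1 - pvCh pixels y x 1| + |pvCh pixels (y+1) x 1 - pvCh pixels y x 1| +
             |pvCh pixels y (x-1) 1 - pvCh pixels y x 1| + |pvCh pixels y (x+1) 1 - pvCh pixels y x 1|
             > threshold * 2
          then [pvBlur pixels y x 0, pvBlur pixels y x 1, pvBlur pixels y x 2]
          else pvPx pixels y x)) row)) frame

-- ===== PORT B =====
-- one summed-area-table entry: p + above + left - above-left, per channel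
def pvSatEntry (p a b c : List Int) : List Int :=
  [p.getD 0 0 + a.getD 0 0 + b.getD 0 0 - c.getD 0 0,
   p.getD 1 0 + a.getD 1 0 + b.getD 1 0 - c.getD 1 0,
   p.getD 2 0 + a.getD 2 0 + b.getD 2 0 - c.getD 2 0]

def pvSatRow (prev : List (List Int)) (row : List (List Int)) (w : Nat) : List (List Int) :=
  (List.range w).foldl (fun cur x =>
    cur ++ [pvSatEntry (row.getD x []) (prev.getD (x+1) []) (cur.getD x []) (prev.getD x [])])
    [[0,0,0]]

def pvSat (pixels : List (List (List Int))) (w : Nat) : List (List (List Int)) :=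
  pixels.foldl (fun sat row => sat ++ [pvSatRow (sat.getD (sat.length - 1) []) row w])
    [List.replicate (w+1) ([0,0,0] : List Int)]

def pvS (sat : List (List (List Int))) (j i ch : Nat) : Int :=
  ((sat.getD j []).getD i []).getD ch 0

def pvBox (sat : List (List (List Int))) (y x ch : Nat) : Int :=
  pvS sat (y+2) (x+2) ch - pvS sat (y-1) (x+2) ch - pvS sat (y+2) (x-1) ch + pvS sat (y-1) (x-1) ch

def pvOutPixel (pixels : List (List (List Int))) (threshold : Int)
    (sat : List (List (List Int))) (y x : Nat) : List Int :=
  let g := pvCh pixels y x 1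
  if |pvCh pixels (y-1) x 1 - g| + |pvCh pixels (y+1) x 1 - g| +
     |pvCh pixels y (x-1) 1 - g| + |pvCh pixels y (x+1) 1 - g| > threshold * 2
  then [PySem.Int.floordiv (pvBox sat y x 0) 9,
        PySem.Int.floordiv (pvBox sat y x 1) 9,
        PySem.Int.floordiv (pvBox sat y x 2) 9]
  else pvPx pixels y x

def fxaa_alt (pixels : List (List (List Int))) (threshold : Int) : List (List (List Int)) :=
  let h := pixels.length
  let w := (pixels.getD 0 []).length
  let sat := if 2 < h ∧ 2 < w then pvSat pixels w else []
  pixels.take 1 ++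
  (List.range' 1 (h - 2)).map (fun y =>
    (List.range w).map (fun x =>
      if x = 0 ∨ x = w - 1 then pvPx pixels y x else pvOutPixel pixels threshold sat y x)) ++
  [pixels.getD (h - 1) []]

-- ===== PRECONDITION & SPEC =====
-- Pre_ excludes empty input (A raises IndexError) and, when there are ≥ 3 rows,
-- grids whose rows are narrower than row 0 or whose pixels have fewer than 3
-- channels (A raises IndexError on such shapes except when the value-dependent
-- edge branch happens never to fire; those never-firing short-channel inputs,
-- on which A still returns, are also excluded — see claim.json cites).
def Pre_fxaa (pixels : List (List (List Int))) (threshold : Int) : Prop :=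
  pixels ≠ [] ∧ (3 ≤ pixels.length →
    1 ≤ (pixels.headD []).length ∧
    (∀ row ∈ (pixels.drop 1).take (pixels.length - 2), (pixels.headD []).length ≤ row.length) ∧
    (3 ≤ (pixels.headD []).length →
      ∀ row ∈ pixels, (pixels.headD []).length ≤ row.length ∧ ∀ px ∈ row, 3 ≤ px.length))
instance (pixels : List (List (List Int))) (threshold : Int) : Decidable (Pre_fxaa pixels threshold) := by
  unfold Pre_fxaa; infer_instance

def pvWitness_fxaa : List (List (List Int)) × Int :=
  ([[[1,2,3],[4,5,6],[7,8,9]],[[9,8,7],[200,5,4],[3,2,1]],[[1,1,1],[2,2,2],[3,3,3]]], 10)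

def Spec_fxaa (pixels : List (List (List Int))) (threshold : Int) (out : List (List (List Int))) : Prop :=
  out = fxaa_alt pixels threshold
instance (pixels : List (List (List Int))) (threshold : Int) (out : List (List (List Int))) : Decidable (Spec_fxaa pixels threshold out) := by
  unfold Spec_fxaa; infer_instance

-- ===== CLAIM (what is proved, stated in full; the proofs are below) =====
def Claim_equal_fxaa : Prop := ∀ (pixels : List (List (List Int))) (threshold : Int), Dom_fxaa pixels threshold → Pre_fxaa pixels threshold → Spec_fxaa pixels threshold (fxaa pixels threshold)

-- ===== LEMMAS AND PROOFS =====


theorem pv_foldl_set_getElem? {α : Type} (d : α) (g : Nat → α → α) :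
  ∀ (n a : Nat) (l : List α) (i : Nat),
  ((List.range' a n).foldl (fun l y => l.set y (g y (l.getD y d))) l)[i]? =
    if a ≤ i ∧ i < a + n ∧ i < l.length then some (g i (l.getD i d)) else l[i]? := by
  intro n
  induction n with
  | zero => intro a l i; simp; intro h1 h2; omega
  | succ m ih =>
    intro a l i
    rw [List.range'_succ, List.foldl_cons, ih]
    have hlen : (l.set a (g a (l.getD a d))).length = l.length := List.length_set ..
    by_cases hi : i = a
    · subst hi
      by_cases hil : i < l.length
      · simp [hil, List.getD_eq_getElem?_getD]
      · simp [hil]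
    · have hgd : (l.set a (g a (l.getD a d))).getD i d = l.getD i d := by
        simp [List.getD_eq_getElem?_getD, Ne.symm hi]
      have hge : (l.set a (g a (l.getD a d)))[i]? = l[i]? := by
        simp [Ne.symm hi]
      rw [hlen, hgd, hge]
      split_ifs with h1 h2 <;> first | rfl | omega

def pvAVal (P : List (List (List Int))) (t : Int) (y x : Nat) : List Int :=
  if |pvCh P (y-1) x 1 - pvCh P y x 1| + |pvCh P (y+1) x 1 - pvCh P y x 1| +
     |pvCh P y (x-1) 1 - pvCh P y x 1| + |pvCh P y (x+1) 1 - pvCh P y x 1| > t * 2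
  then [pvBlur P y x 0, pvBlur P y x 1, pvBlur P y x 2]
  else pvPx P y x

def pvARow (P : List (List (List Int))) (t : Int) (w y : Nat) : List (List Int) :=
  (List.range w).map (fun x => if x = 0 ∨ x = w - 1 then pvPx P y x else pvAVal P t y x)

theorem pvARow_eq (P : List (List (List Int))) (t : Int) (w y : Nat) :
    (List.range' 1 (w - 2)).foldl (fun row x => row.set x (pvAVal P t y x))
      (((List.replicate w ([] : List Int)).set 0 (pvPx P y 0)).set (w-1) (pvPx P y (w-1)))
    = pvARow P t w y := by
  apply List.ext_getElem?
  intro i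
  have h := pv_foldl_set_getElem? ([] : List Int) (fun x _ => pvAVal P t y x) (w-2) 1
    (((List.replicate w ([] : List Int)).set 0 (pvPx P y 0)).set (w-1) (pvPx P y (w-1))) i
  simp only [] at h
  rw [h]
  simp only [List.length_set, List.length_replicate, pvARow, List.getElem?_map]
  by_cases hiw : i < w
  · by_cases hmid : 1 ≤ i ∧ i < 1 + (w-2)
    · have : ¬ (i = 0 ∨ i = w - 1) := by omega
      simp [hmid, hiw, this]
    · simp only [hmid, hiw, and_true, if_false]
      have : (i = 0 ∨ i = w - 1) := by omega
      rcases this with h0 | h1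
      · subst h0
        rcases Nat.eq_or_lt_of_le (by omega : 1 ≤ w) with hw1 | hw2
        · simp [← hw1]
        · simp [List.getElem?_set, List.length_set]
          split_ifs <;> simp_all
      · subst h1
        simp [List.getElem?_set, List.length_set]
        split_ifs <;> simp_all
  · have : ¬ (1 ≤ i ∧ i < 1 + (w-2) ∧ i < w) := by omega
    simp [hiw]

def pvAMap (P : List (List (List Int))) (t : Int) : List (List (List Int)) :=
  (List.range P.length).map (fun y =>
    if y = 0 ∨ y = P.length - 1 then P.getD y []
    else pvARow P t ((P.getD 0 []).length) y)

theorem fxaa_eq (P : List (List (List Int))) (t : Int) (h2 : 2 ≤ P.length) :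
    fxaa P t = pvAMap P t := by
  show (List.range' 1 (P.length - 2)).foldl
      (fun frame y => frame.set y ((List.range' 1 ((P.getD 0 []).length - 2)).foldl
        (fun row x => row.set x (pvAVal P t y x))
        (((frame.getD y []).set 0 (pvPx P y 0)).set ((P.getD 0 []).length - 1)
          (pvPx P y ((P.getD 0 []).length - 1)))))
      ((P.take 1 ++ (List.range (P.length - 2)).map (fun _ => List.replicate (P.getD 0 []).length ([] : List Int))) ++ [P.getD (P.length - 1) []])
    = pvAMap P t
  apply List.ext_getElem?
  intro i
  have h1 : ((List.range' 1 (P.length - 2)).foldl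
      (fun frame y => frame.set y ((List.range' 1 ((P.getD 0 []).length - 2)).foldl
        (fun row x => row.set x (pvAVal P t y x))
        (((frame.getD y []).set 0 (pvPx P y 0)).set ((P.getD 0 []).length - 1)
          (pvPx P y ((P.getD 0 []).length - 1)))))
      ((P.take 1 ++ (List.range (P.length - 2)).map (fun _ => List.replicate (P.getD 0 []).length ([] : List Int))) ++ [P.getD (P.length - 1) []]))[i]?
    = if 1 ≤ i ∧ i < 1 + (P.length - 2) ∧ i < ((P.take 1 ++ (List.range (P.length - 2)).map (fun _ => List.replicate (P.getD 0 []).length ([] : List Int))) ++ [P.getD (P.length - 1) []]).length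
      then some ((List.range' 1 ((P.getD 0 []).length - 2)).foldl
        (fun row x => row.set x (pvAVal P t i x))
        (((((P.take 1 ++ (List.range (P.length - 2)).map (fun _ => List.replicate (P.getD 0 []).length ([] : List Int))) ++ [P.getD (P.length - 1) []]).getD i []).set 0 (pvPx P i 0)).set ((P.getD 0 []).length - 1)
          (pvPx P i ((P.getD 0 []).length - 1))))
      else ((P.take 1 ++ (List.range (P.length - 2)).map (fun _ => List.replicate (P.getD 0 []).length ([] : List Int))) ++ [P.getD (P.length - 1) []])[i]? :=
    pv_foldl_set_getElem? ([] : List (List Int))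
      (fun y r => (List.range' 1 ((P.getD 0 []).length - 2)).foldl
        (fun row x => row.set x (pvAVal P t y x))
        ((r.set 0 (pvPx P y 0)).set ((P.getD 0 []).length - 1) (pvPx P y ((P.getD 0 []).length - 1))))
      (P.length - 2) 1 _ i
  have hlen : ((P.take 1 ++ (List.range (P.length - 2)).map (fun _ => List.replicate (P.getD 0 []).length ([] : List Int))) ++ [P.getD (P.length - 1) []]).length = P.length := by
    simp; omega
  rw [hlen] at h1
  rw [h1]
  simp only [pvAMap, List.getElem?_map]
  by_cases hih : i < P.length
  · rw [List.getElem?_range hih]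
    simp only [Option.map_some]
    by_cases hmid : 1 ≤ i ∧ i < 1 + (P.length - 2)
    · have hgd : ((P.take 1 ++ (List.range (P.length - 2)).map (fun _ => List.replicate (P.getD 0 []).length ([] : List Int))) ++ [P.getD (P.length - 1) []]).getD i []
          = List.replicate (P.getD 0 []).length ([] : List Int) := by
        rw [List.getD_eq_getElem?_getD,
            List.getElem?_append_left (by simp; omega),
            List.getElem?_append_right (by simp; omega)]
        simp
        rw [List.getElem?_replicate, if_pos (by omega)]
        simp
      have hne : ¬ (i = 0 ∨ i = P.length - 1) := by omega
      rw [if_pos ⟨hmid.1, hmid.2, hih⟩, hgd, pvARow_eq, if_neg hne]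
    · have hcond : ¬ (1 ≤ i ∧ i < 1 + (P.length - 2) ∧ i < P.length) := by omega
      rw [if_neg hcond]
      have hb : i = 0 ∨ i = P.length - 1 := by omega
      rw [if_pos hb]
      rcases hb with h0 | hlast
      · subst h0
        rw [List.getElem?_append_left (by simp; omega),
            List.getElem?_append_left (by simp; omega)]
        rw [List.getElem?_take_of_lt (by omega), List.getElem?_eq_getElem (by omega),
            List.getD_eq_getElem?_getD, List.getElem?_eq_getElem (by omega)]
        simp
      · subst hlast
        rw [List.getElem?_append_right (by rw [List.length_append, List.length_take, List.length_map, List.length_range]; omega)]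
        rw [List.length_append, List.length_take, List.length_map, List.length_range]
        have : P.length - 1 - (min 1 P.length + (P.length - 2)) = 0 := by omega
        rw [this]
        simp
  · have hcond : ¬ (1 ≤ i ∧ i < 1 + (P.length - 2) ∧ i < P.length) := by omega
    have hr : (List.range P.length)[i]? = none := List.getElem?_eq_none (by rw [List.length_range]; omega)
    rw [if_neg hcond, hr, List.getElem?_eq_none (by rw [hlen]; omega)]
    simp

def pvRowT (row : List (List Int)) (i c : Nat) : Int :=
  ∑ x ∈ Finset.range i, (row.getD x []).getD c 0

def pvHh (prev row : List (List Int)) (i c : Nat) : Int :=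
  (prev.getD i []).getD c 0 - (prev.getD 0 []).getD c 0 + pvRowT row i c

theorem pvSatRow_succ (prev row : List (List Int)) (w : Nat) :
    pvSatRow prev row (w+1) = pvSatRow prev row w ++
      [pvSatEntry (row.getD w []) (prev.getD (w+1) []) ((pvSatRow prev row w).getD w []) (prev.getD w [])] := by
  unfold pvSatRow
  rw [List.range_succ, List.foldl_append]
  rfl

theorem satRow_eq (prev row : List (List Int)) (w : Nat) :
    pvSatRow prev row w = (List.range (w+1)).map (fun i => [pvHh prev row i 0, pvHh prev row i 1, pvHh prev row i 2]) := by
  induction w with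
  | zero => simp [pvSatRow, pvHh, pvRowT]
  | succ m ih =>
    rw [pvSatRow_succ, ih, List.range_succ (n := m + 1), List.map_append]
    congr 1
    have hg : ((List.range (m+1)).map (fun i => [pvHh prev row i 0, pvHh prev row i 1, pvHh prev row i 2])).getD m []
        = [pvHh prev row m 0, pvHh prev row m 1, pvHh prev row m 2] := by
      rw [List.getD_eq_getElem?_getD, List.getElem?_map, List.getElem?_range (by omega)]
      rfl
    rw [hg]
    simp only [pvSatEntry, List.map_cons, List.map_nil, List.cons.injEq, and_true]
    refine ⟨?_, ?_, ?_⟩ <;>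
      · show _ = pvHh prev row (m+1) _
        simp only [pvHh, pvRowT, Finset.sum_range_succ, List.getD_cons_zero, List.getD_cons_succ]
        ring

def pvSsum (P : List (List (List Int))) (j i c : Nat) : Int :=
  ∑ a ∈ Finset.range j, pvRowT (P.getD a []) i c

def pvSatSpec (P : List (List (List Int))) (w : Nat) : List (List (List Int)) :=
  (List.range (P.length + 1)).map (fun j =>
    (List.range (w+1)).map (fun i => [pvSsum P j i 0, pvSsum P j i 1, pvSsum P j i 2]))

theorem pvSat_concat (P : List (List (List Int))) (r : List (List Int)) (w : Nat) :
    pvSat (P ++ [r]) w = pvSat P w ++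
      [pvSatRow ((pvSat P w).getD ((pvSat P w).length - 1) []) r w] := by
  unfold pvSat
  rw [List.foldl_append]
  rfl

theorem pvSsum_zero_right (P : List (List (List Int))) (j c : Nat) : pvSsum P j 0 c = 0 := by
  simp [pvSsum, pvRowT]

theorem pvSsum_append_le (P : List (List (List Int))) (r : List (List Int)) (j i c : Nat)
    (hj : j ≤ P.length) : pvSsum (P ++ [r]) j i c = pvSsum P j i c := by
  unfold pvSsum
  apply Finset.sum_congr rfl
  intro a ha
  rw [Finset.mem_range] at ha
  rw [List.getD_eq_getElem?_getD, List.getD_eq_getElem?_getD, List.getElem?_append_left (by omega)]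

theorem sat_eq (P : List (List (List Int))) (w : Nat) :
    pvSat P w = pvSatSpec P w := by
  induction P using List.reverseRecOn with
  | nil =>
    simp [pvSat, pvSatSpec, pvSsum, List.map_const']
  | append_singleton P r ih =>
    rw [pvSat_concat, ih]
    have hlen : (pvSatSpec P w).length = P.length + 1 := by
      simp [pvSatSpec]
    have hlast : (pvSatSpec P w).getD ((pvSatSpec P w).length - 1) []
        = (List.range (w+1)).map (fun i => [pvSsum P P.length i 0, pvSsum P P.length i 1, pvSsum P P.length i 2]) := by
      rw [hlen, List.getD_eq_getElem?_getD]
      unfold pvSatSpec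
      rw [List.getElem?_map, List.getElem?_range (by omega)]
      rfl
    rw [hlast, satRow_eq]
    unfold pvSatSpec
    rw [List.length_append, List.length_singleton, List.range_succ (n := P.length + 1), List.map_append]
    congr 1
    · apply List.map_congr_left
      intro j hj
      rw [List.mem_range] at hj
      simp only [pvSsum_append_le P r _ _ _ (by omega : j ≤ P.length)]
    · simp only [List.map_cons, List.map_nil, List.cons.injEq, and_true]
      apply List.map_congr_left
      intro i hi
      rw [List.mem_range] at hi
      have hrow : ((List.range (w+1)).map (fun i => [pvSsum P P.length i 0, pvSsum P P.length i 1, pvSsum P P.length i 2])).getD i []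
          = [pvSsum P P.length i 0, pvSsum P P.length i 1, pvSsum P P.length i 2] := by
        rw [List.getD_eq_getElem?_getD, List.getElem?_map, List.getElem?_range (by omega)]
        rfl
      have hget : ∀ c : Nat, c < 3 → (((List.range (w+1)).map (fun i => [pvSsum P P.length i 0, pvSsum P P.length i 1, pvSsum P P.length i 2])).getD i []).getD c 0 = pvSsum P P.length i c := by
        intro c hc
        rw [hrow]
        interval_cases c <;> rfl
      have hS : ∀ c : Nat, pvSsum (P ++ [r]) (P.length + 1) i c = pvSsum P P.length i c + pvRowT r i c := by
        intro c
        unfold pvSsum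
        rw [Finset.sum_range_succ]
        congr 1
        · apply Finset.sum_congr rfl
          intro a ha
          rw [Finset.mem_range] at ha
          rw [List.getD_eq_getElem?_getD, List.getD_eq_getElem?_getD, List.getElem?_append_left (by omega)]
        · rw [List.getD_eq_getElem?_getD, List.getElem?_concat_length]
          rfl
      simp only [pvHh, hget 0 (by omega), hget 1 (by omega), hget 2 (by omega),
        hS 0, hS 1, hS 2]
      norm_num
      exact ⟨pvSsum_zero_right P P.length 0, pvSsum_zero_right P P.length 1, pvSsum_zero_right P P.length 2⟩

theorem pvS_sat (P : List (List (List Int))) (w j i c : Nat)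
    (hj : j ≤ P.length) (hi : i ≤ w) (hc : c < 3) :
    pvS (pvSat P w) j i c = pvSsum P j i c := by
  rw [pvS, sat_eq]
  have h1 : (pvSatSpec P w).getD j [] = (List.range (w+1)).map (fun i => [pvSsum P j i 0, pvSsum P j i 1, pvSsum P j i 2]) := by
    rw [pvSatSpec, List.getD_eq_getElem?_getD, List.getElem?_map, List.getElem?_range (by omega)]
    rfl
  rw [h1]
  have h2 : ((List.range (w+1)).map (fun i => [pvSsum P j i 0, pvSsum P j i 1, pvSsum P j i 2])).getD i [] = [pvSsum P j i 0, pvSsum P j i 1, pvSsum P j i 2] := by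
    rw [List.getD_eq_getElem?_getD, List.getElem?_map, List.getElem?_range (by omega)]
    rfl
  rw [h2]
  interval_cases c <;> rfl

theorem pvRowT_add3 (P : List (List (List Int))) (a i c : Nat) :
    pvRowT (P.getD a []) (i+3) c = pvRowT (P.getD a []) i c + pvCh P a i c + pvCh P a (i+1) c + pvCh P a (i+2) c := by
  have e : i + 3 = i + 2 + 1 := rfl
  rw [pvRowT, e, Finset.sum_range_succ, Finset.sum_range_succ, Finset.sum_range_succ]
  rfl

theorem pvSsum_add3 (P : List (List (List Int))) (j i c : Nat) :
    pvSsum P (j+3) i c = pvSsum P j i c + pvRowT (P.getD j []) i c + pvRowT (P.getD (j+1) []) i c + pvRowT (P.getD (j+2) []) i c := by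
  have e : j + 3 = j + 2 + 1 := rfl
  rw [pvSsum, e, Finset.sum_range_succ, Finset.sum_range_succ, Finset.sum_range_succ]
  rfl

theorem box_eq (P : List (List (List Int))) (w y x c : Nat) (hc : c < 3)
    (hy1 : 1 ≤ y) (hy2 : y + 2 ≤ P.length) (hx1 : 1 ≤ x) (hx2 : x + 2 ≤ w) :
    pvBox (pvSat P w) y x c =
      pvCh P (y-1) (x-1) c + pvCh P (y-1) x c + pvCh P (y-1) (x+1) c +
      pvCh P y (x-1) c + pvCh P y x c + pvCh P y (x+1) c +
      pvCh P (y+1) (x-1) c + pvCh P (y+1) x c + pvCh P (y+1) (x+1) c := by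
  obtain ⟨y', rfl⟩ : ∃ y', y = y' + 1 := ⟨y - 1, by omega⟩
  obtain ⟨x', rfl⟩ : ∃ x', x = x' + 1 := ⟨x - 1, by omega⟩
  have ey : y' + 1 + 2 = y' + 3 := rfl
  have ex : x' + 1 + 2 = x' + 3 := rfl
  have ey1 : y' + 1 - 1 = y' := rfl
  have ex1 : x' + 1 - 1 = x' := rfl
  rw [pvBox, ey, ex, ey1, ex1]
  rw [pvS_sat P w _ _ c (by omega) (by omega) hc, pvS_sat P w _ _ c (by omega) (by omega) hc,
      pvS_sat P w _ _ c (by omega) (by omega) hc, pvS_sat P w _ _ c (by omega) (by omega) hc]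
  rw [pvSsum_add3, pvSsum_add3, pvRowT_add3, pvRowT_add3, pvRowT_add3]
  have e1 : y' + 1 + 1 = y' + 2 := rfl
  have e2 : x' + 1 + 1 = x' + 2 := rfl
  rw [e1, e2]
  ring

theorem outPixel_eq (P : List (List (List Int))) (t : Int) (w y x : Nat)
    (hy1 : 1 ≤ y) (hy2 : y + 2 ≤ P.length) (hx1 : 1 ≤ x) (hx2 : x + 2 ≤ w) :
    pvOutPixel P t (pvSat P w) y x = pvAVal P t y x := by
  rw [pvOutPixel, pvAVal]
  by_cases hcond : |pvCh P (y-1) x 1 - pvCh P y x 1| + |pvCh P (y+1) x 1 - pvCh P y x 1| +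
      |pvCh P y (x-1) 1 - pvCh P y x 1| + |pvCh P y (x+1) 1 - pvCh P y x 1| > t * 2
  · rw [if_pos hcond, if_pos hcond, pvBlur, pvBlur, pvBlur,
        box_eq P w y x 0 (by omega) hy1 hy2 hx1 hx2,
        box_eq P w y x 1 (by omega) hy1 hy2 hx1 hx2,
        box_eq P w y x 2 (by omega) hy1 hy2 hx1 hx2]
  · rw [if_neg hcond, if_neg hcond]

theorem inner_row_eq (P : List (List (List Int))) (t : Int) (y : Nat)
    (hy1 : 1 ≤ y) (hy2 : y + 2 ≤ P.length) :
    (List.range (P.getD 0 []).length).map (fun x =>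
      if x = 0 ∨ x = (P.getD 0 []).length - 1 then pvPx P y x
      else pvOutPixel P t (if 2 < P.length ∧ 2 < (P.getD 0 []).length then pvSat P (P.getD 0 []).length else []) y x)
    = pvARow P t ((P.getD 0 []).length) y := by
  rw [pvARow]
  apply List.map_congr_left
  intro x hx
  rw [List.mem_range] at hx
  by_cases hxb : x = 0 ∨ x = (P.getD 0 []).length - 1
  · rw [if_pos hxb, if_pos hxb]
  · rw [if_neg hxb, if_neg hxb]
    have hg : (2 < P.length ∧ 2 < (P.getD 0 []).length) := by omega
    rw [if_pos hg]
    exact outPixel_eq P t _ y x (by omega) (by omega) (by omega) (by omega)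

theorem alt_eq (P : List (List (List Int))) (t : Int) (h2 : 2 ≤ P.length) :
    fxaa_alt P t = pvAMap P t := by
  show (P.take 1 ++
      (List.range' 1 (P.length - 2)).map (fun y =>
        (List.range (P.getD 0 []).length).map (fun x =>
          if x = 0 ∨ x = (P.getD 0 []).length - 1 then pvPx P y x
          else pvOutPixel P t (if 2 < P.length ∧ 2 < (P.getD 0 []).length then pvSat P (P.getD 0 []).length else []) y x))) ++
      [P.getD (P.length - 1) []] = pvAMap P t
  apply List.ext_getElem?
  intro i
  have hlen1 : (P.take 1).length = 1 := by simp; omega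
  simp only [pvAMap, List.getElem?_map]
  by_cases hih : i < P.length
  · rw [List.getElem?_range hih, Option.map_some]
    by_cases hmid : 1 ≤ i ∧ i < 1 + (P.length - 2)
    · rw [List.getElem?_append_left (by simp [hlen1]; omega),
          List.getElem?_append_right (by simp [hlen1]; omega), hlen1,
          List.getElem?_map, List.getElem?_range' (by omega)]
      have hy : 1 + 1 * (i - 1) = i := by omega
      rw [hy, Option.map_some, inner_row_eq P t i (by omega) (by omega)]
      have hne : ¬ (i = 0 ∨ i = P.length - 1) := by omega
      rw [if_neg hne]
    · have hb : i = 0 ∨ i = P.length - 1 := by omega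
      rw [if_pos hb]
      rcases hb with h0 | hlast
      · subst h0
        rw [List.getElem?_append_left (by simp [hlen1]),
            List.getElem?_append_left (by omega)]
        rw [List.getElem?_take_of_lt (by omega)]
        rw [List.getD_eq_getElem?_getD, List.getElem?_eq_getElem (by omega)]
        simp
      · subst hlast
        rw [List.getElem?_append_right (by simp [hlen1]; omega)]
        rw [List.length_append, hlen1, List.length_map, List.length_range']
        have : P.length - 1 - (1 + (P.length - 2)) = 0 := by omega
        rw [this]
        simp
  · have hr : (List.range P.length)[i]? = none := List.getElem?_eq_none (by rw [List.length_range]; omega)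
    rw [hr, List.getElem?_eq_none (by simp [hlen1]; omega)]
    simp

-- ===== VERDICT (by name: the statement is the Claim_ definition above) =====
theorem fxaa_spec : Claim_equal_fxaa := by
  unfold Claim_equal_fxaa
  intro P t _ hPre
  show fxaa P t = fxaa_alt P t
  have h1 : P ≠ [] := hPre.1
  have hlen1 : 0 < P.length := List.length_pos_of_ne_nil h1
  by_cases hone : P.length = 1
  · obtain ⟨r, rfl⟩ := List.length_eq_one_iff.mp hone
    rfl
  · have h2 : 2 ≤ P.length := by omega
    rw [fxaa_eq P t h2, alt_eq P t h2]
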